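-- pv_equiv track=rewrite | github.com/mujn1461/event_coding_gui | event_code_gui.py | extract_nested_texts
-- ===== SOURCE A (Python) =====
-- def extract_nested_texts(text):
--     nested_texts = []
--     start_index = text.find('{')
--     while start_index != -1:
--         end_index = text.find('}', start_index)
--         if end_index != -1:
--             nested_texts.append(text[start_index + 1:end_index].strip())
--             start_index = text.find('{', end_index + 1)
--         else:
--             break
--     return nested_texts
-- ===== SOURCE B (Python) =====
-- def extract_nested_texts(text):
--     results = []
--     buf = None
--     for ch in text:
--         if buf is None:
--             if ch == '{':
--                 buf = []
--         elif ch == '}':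
--             results.append(''.join(buf).strip())
--             buf = None
--         else:
--             buf.append(ch)
--     return results
-- ===== Notes on version B (the rewrite author's own statement) =====
-- stated objective: idiomatic
-- what changed: Replaced A's repeated str.find index jumping over the whole string with a single left-to-right character scan that keeps an open-brace buffer and emits the stripped buffer on each closing brace.
import Mathlib
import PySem

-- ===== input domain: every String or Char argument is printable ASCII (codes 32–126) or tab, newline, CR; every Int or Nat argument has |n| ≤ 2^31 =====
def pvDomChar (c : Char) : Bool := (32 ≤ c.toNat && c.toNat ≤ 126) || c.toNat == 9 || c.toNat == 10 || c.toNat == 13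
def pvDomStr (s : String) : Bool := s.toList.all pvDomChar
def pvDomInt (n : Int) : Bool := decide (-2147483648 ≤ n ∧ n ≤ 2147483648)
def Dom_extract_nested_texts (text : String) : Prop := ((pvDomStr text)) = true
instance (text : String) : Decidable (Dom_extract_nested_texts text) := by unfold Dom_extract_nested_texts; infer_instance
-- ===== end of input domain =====

-- B replaces A's repeated str.find scanning with a single left-to-right character scan
-- keeping an open-brace buffer (objective: idiomatic single pass; same output).

-- ===== PORT A =====
-- A's while loop over (nested_texts, start_index); the string is constant. The fuel
-- argument (text length + 1) only makes the recursion structural: each iteration moves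
-- start_index strictly forward, so the fuel never runs out (proved in the lemmas below).
def pvA_loop (text : String) (nested : List String) (start : Int) : Nat → List String
  | 0 => nested
  | fuel + 1 =>
    if start ≠ -1 then
      let e := PySem.Str.findFrom text "}" start
      if e ≠ -1 then
        pvA_loop text
          (nested ++ [PySem.Str.strip (PySem.Str.slice text (some (start + 1)) (some e))])
          (PySem.Str.findFrom text "{" (e + 1)) fuel
      else nested
    else nested

def extract_nested_texts (text : String) : List String :=
  pvA_loop text [] (PySem.Str.find text "{") (text.toList.length + 1)

-- ===== PORT B =====
-- one step of B's for-loop: state = (results, buf), buf = none outside braces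
def pvB_step (st : List String × Option (List Char)) (ch : Char) :
    List String × Option (List Char) :=
  match st.2 with
  | none => if ch = '{' then (st.1, some []) else st
  | some buf =>
    if ch = '}' then (st.1 ++ [PySem.Str.strip (String.ofList buf)], none)
    else (st.1, some (buf ++ [ch]))

def extract_nested_texts_alt (text : String) : List String :=
  (text.toList.foldl pvB_step ([], none)).1

-- ===== PRECONDITION & SPEC =====
def Spec_extract_nested_texts (text : String) (out : List String) : Prop := out = extract_nested_texts_alt text
instance (text : String) (out : List String) : Decidable (Spec_extract_nested_texts text out) := by unfold Spec_extract_nested_texts; infer_instance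

-- ===== CLAIM (what is proved, stated in full; the proofs are below) =====
def Claim_equal_extract_nested_texts : Prop := ∀ (text : String), Dom_extract_nested_texts text → Spec_extract_nested_texts text (extract_nested_texts text)

-- ===== LEMMAS AND PROOFS =====

-- first-occurrence decomposition of a list at a member
lemma pv_first_occ (c : Char) (l : List Char) (h : c ∈ l) :
    ∃ pre post, l = pre ++ c :: post ∧ c ∉ pre := by
  have hne : l.dropWhile (fun x => x != c) ≠ [] := by
    simp only [ne_eq, List.dropWhile_eq_nil_iff]
    intro hall
    have := hall c h
    simp at this
  obtain ⟨a, t, hat⟩ := List.exists_cons_of_ne_nil hne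
  have ha : a = c := by
    have hhead := List.head?_dropWhile_not (fun x => x != c) l
    have h2 : (l.dropWhile (fun x => x != c)).head? = some a := by rw [hat]; rfl
    rw [h2] at hhead
    simpa using hhead
  refine ⟨l.takeWhile (fun x => x != c), t, ?_, ?_⟩
  · conv_lhs => rw [← List.takeWhile_append_dropWhile (p := fun x => x != c) (l := l)]
    rw [hat, ha]
  · intro hmem
    have := List.mem_takeWhile_imp hmem
    simp at this

-- Chars.find of a single character at its first occurrence
lemma pv_find_first_single (c : Char) (pre post : List Char) (hpre : c ∉ pre) :
    PySem.Chars.find (pre ++ c :: post) [c] = (pre.length : Int) := by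
  have hmem : c ∈ pre ++ c :: post := by simp
  have hne : PySem.Chars.find (pre ++ c :: post) [c] ≠ -1 :=
    (PySem.Chars.find_ne_neg_one_iff _ _).2 ((List.singleton_infix_iff _ _).2 hmem)
  have hge : 0 ≤ PySem.Chars.find (pre ++ c :: post) [c] := by
    have := PySem.Chars.neg_one_le_find (pre ++ c :: post) [c]; omega
  obtain ⟨hpref, hmin⟩ := PySem.Chars.find_spec hge
  have hj_le : (PySem.Chars.find (pre ++ c :: post) [c]).toNat ≤ pre.length := by
    by_contra h'
    rw [not_le] at h'
    exact hmin pre.length h' (by rw [List.drop_left]; exact ⟨post, rfl⟩)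
  have hj_ge : pre.length ≤ (PySem.Chars.find (pre ++ c :: post) [c]).toNat := by
    by_contra h'
    rw [not_le] at h'
    obtain ⟨t, ht⟩ := hpref
    have h1 : ((pre ++ c :: post).drop (PySem.Chars.find (pre ++ c :: post) [c]).toNat).head?
        = some c := by rw [← ht]; rfl
    rw [List.head?_drop, List.getElem?_append_left h'] at h1
    exact hpre (List.mem_of_getElem? h1)
  have : (PySem.Chars.find (pre ++ c :: post) [c]).toNat = pre.length := by omega
  omega

lemma pv_findFrom_first (c : Char) (s : List Char) (k : Nat) (pre post : List Char)
    (hk : k ≤ s.length) (hd : s.drop k = pre ++ c :: post) (hpre : c ∉ pre) :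
    PySem.Chars.findFrom s [c] (k : Int) = ((k + pre.length : Nat) : Int) := by
  rw [PySem.Chars.findFrom_natCast s [c] k hk, hd, pv_find_first_single c pre post hpre]
  rw [if_neg (by omega : ¬ (pre.length : Int) = -1)]
  push_cast
  ring

lemma pv_findFrom_none (c : Char) (s : List Char) (k : Nat) (hk : k ≤ s.length)
    (h : c ∉ s.drop k) : PySem.Chars.findFrom s [c] (k : Int) = -1 := by
  rw [PySem.Chars.findFrom_natCast_eq_neg_one_iff s [c] k hk, List.singleton_infix_iff]
  exact h

-- B's fold skips characters outside braces until a '{'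
lemma pv_foldl_no_open (pre : List Char) (h : '{' ∉ pre) (res : List String) :
    pre.foldl pvB_step (res, none) = (res, none) := by
  induction pre with
  | nil => rfl
  | cons a pre ih =>
    have ha : a ≠ '{' := by intro he; exact h (he ▸ List.mem_cons_self)
    have h' : '{' ∉ pre := fun hm => h (List.mem_cons_of_mem a hm)
    simp only [List.foldl_cons, pvB_step, if_neg ha]
    exact ih h'

-- B's fold accumulates characters inside braces until a '}'
lemma pv_foldl_no_close (mid : List Char) (h : '}' ∉ mid) (res : List String) :
    ∀ buf, mid.foldl pvB_step (res, some buf) = (res, some (buf ++ mid)) := by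
  induction mid with
  | nil => intro _; simp
  | cons a mid ih =>
    intro buf
    have ha : a ≠ '}' := by intro he; exact h (he ▸ List.mem_cons_self)
    have h' : '}' ∉ mid := fun hm => h (List.mem_cons_of_mem a hm)
    simp only [List.foldl_cons, pvB_step, if_neg ha]
    rw [ih h' (buf ++ [a])]
    simp

-- main invariant: from any scan position k, A's find-driven loop equals B's scan of the suffix
lemma pv_main (text : String) (fuel : Nat) :
    ∀ (k : Nat) (acc : List String), k ≤ text.toList.length → text.toList.length - k < fuel →
    pvA_loop text acc (PySem.Chars.findFrom text.toList ['{'] (k : Int)) fuel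
      = ((text.toList.drop k).foldl pvB_step (acc, none)).1 := by
  induction fuel with
  | zero => intro k acc hk hf; omega
  | succ fuel ih =>
    intro k acc hk hf
    set s := text.toList with hs
    by_cases hb : '{' ∈ s.drop k
    · obtain ⟨pre, post, hdec, hpre⟩ := pv_first_occ '{' (s.drop k) hb
      have hlen : s.length - k = pre.length + post.length + 1 := by
        have := congrArg List.length hdec
        simpa using this
      have hstart := pv_findFrom_first '{' s k pre post hk hdec hpre
      rw [hstart]
      have hd1 : s.drop (k + pre.length) = '{' :: post := by
        rw [← List.drop_drop, hdec, List.drop_left]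
      have hk1 : k + pre.length ≤ s.length := by omega
      -- unfold one loop step
      simp only [pvA_loop]
      have hsne : (((k + pre.length : Nat) : Int) ≠ -1) := by
        have : (0:Int) ≤ ((k + pre.length : Nat) : Int) := Int.natCast_nonneg _
        omega
      rw [if_pos hsne]
      simp only [PySem.Str.findFrom_eq, ← hs]
      have hcl : ("}" : String).toList = ['}'] := by decide
      have hop : ("{" : String).toList = ['{'] := by decide
      rw [hcl, hop]
      by_cases hc : '}' ∈ post
      · obtain ⟨mid, tail, hpost, hmid⟩ := pv_first_occ '}' post hc
        have hd2 : s.drop (k + pre.length) = ('{' :: mid) ++ '}' :: tail := by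
          rw [hd1, hpost]; rfl
        have hmid' : '}' ∉ '{' :: mid := by
          intro hm
          rcases List.mem_cons.1 hm with h | h
          · exact absurd h.symm (by decide)
          · exact hmid h
        have he := pv_findFrom_first '}' s (k + pre.length) ('{' :: mid) tail hk1 hd2 hmid'
        rw [he]
        have hene : (((k + pre.length + ('{' :: mid).length : Nat) : Int) ≠ -1) := by
          have : (0:Int) ≤ ((k + pre.length + ('{' :: mid).length : Nat) : Int) :=
            Int.natCast_nonneg _
          omega
        rw [if_pos hene]
        have hlen2 : post.length = mid.length + tail.length + 1 := by
          have := congrArg List.length hpost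
          simpa using this
        -- the sliced text is exactly mid
        have hslice : (PySem.Str.slice text (some (((k + pre.length : Nat) : Int) + 1))
            (some ((k + pre.length + ('{' :: mid).length : Nat) : Int))).toList = mid := by
          rw [PySem.Str.toList_slice, PySem.Chars.slice_eq_listSlice, ← hs]
          have h1 : (((k + pre.length : Nat) : Int) + 1) = ((k + pre.length + 1 : Nat) : Int) := by
            push_cast; ring
          rw [h1, PySem.List.slice_toNat s (Int.natCast_nonneg _) (Int.natCast_nonneg _)]
          simp only [Int.toNat_natCast]
          have hd3 : s.drop (k + pre.length + 1) = mid ++ '}' :: tail := by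
            rw [← List.drop_drop, hd1]
            simp [hpost]
          rw [hd3]
          have : k + pre.length + ('{' :: mid).length - (k + pre.length + 1) = mid.length := by
            simp only [List.length_cons]; omega
          rw [this, List.take_left]
        have hstr : PySem.Str.strip (PySem.Str.slice text (some (((k + pre.length : Nat) : Int) + 1))
            (some ((k + pre.length + ('{' :: mid).length : Nat) : Int)))
            = PySem.Str.strip (String.ofList mid) := by
          apply String.toList_injective
          rw [PySem.Str.toList_strip, PySem.Str.toList_strip, hslice, String.toList_ofList]
        -- next start index
        have he1 : (((k + pre.length + ('{' :: mid).length : Nat) : Int) + 1)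
            = ((k + pre.length + mid.length + 2 : Nat) : Int) := by
          push_cast [List.length_cons]; ring
        have hk2 : k + pre.length + mid.length + 2 ≤ s.length := by
          omega
        have hd4 : s.drop (k + pre.length + mid.length + 2) = tail := by
          have : k + pre.length + mid.length + 2 = (k + pre.length) + (mid.length + 2) := by ring
          rw [this, ← List.drop_drop, hd2]
          have h2 : ('{' :: mid) ++ '}' :: tail = (('{' :: mid) ++ ['}']) ++ tail := by simp
          rw [h2]
          have h3 : (('{' :: mid) ++ ['}']).length = mid.length + 2 := by simp
          rw [← h3, List.drop_left]
        have hf2 : s.length - (k + pre.length + mid.length + 2) < fuel := by omega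
        rw [hstr, he1]
        rw [ih (k + pre.length + mid.length + 2)
          (acc ++ [PySem.Str.strip (String.ofList mid)]) hk2 hf2]
        -- evaluate B's fold on the decomposed suffix
        rw [hd4, hdec, hpost]
        rw [List.foldl_append, pv_foldl_no_open pre hpre acc]
        simp only [List.foldl_cons]
        have hstep1 : pvB_step (acc, none) '{' = (acc, some []) := by simp [pvB_step]
        rw [hstep1, List.foldl_append, pv_foldl_no_close mid hmid acc []]
        simp only [List.foldl_cons, List.nil_append]
        have hstep2 : pvB_step (acc, some mid) '}'
            = (acc ++ [PySem.Str.strip (String.ofList mid)], none) := by simp [pvB_step]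
        rw [hstep2]
      · -- no closing brace after the first '{': A breaks, B never closes the buffer
        have hcm : '}' ∉ '{' :: post := by
          intro hm
          rcases List.mem_cons.1 hm with h | h
          · exact absurd h.symm (by decide)
          · exact hc h
        have he := pv_findFrom_none '}' s (k + pre.length) hk1 (by rw [hd1]; exact hcm)
        rw [he]
        simp only [ne_eq, not_true_eq_false, if_false]
        rw [hdec, List.foldl_append, pv_foldl_no_open pre hpre acc]
        simp only [List.foldl_cons]
        have hstep1 : pvB_step (acc, none) '{' = (acc, some []) := by simp [pvB_step]
        rw [hstep1, pv_foldl_no_close post hc acc []]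
    · -- no '{' from position k: A stops, B scans to the end producing nothing
      rw [pv_findFrom_none '{' s k hk hb]
      simp only [pvA_loop, ne_eq, not_true_eq_false, if_false]
      rw [pv_foldl_no_open (s.drop k) hb acc]

-- ===== VERDICT (by name: the statement is the Claim_ definition above) =====
theorem extract_nested_texts_spec : Claim_equal_extract_nested_texts := by
  intro text _
  unfold Spec_extract_nested_texts extract_nested_texts extract_nested_texts_alt
  have h0 : PySem.Str.find text "{" = PySem.Chars.findFrom text.toList ['{'] ((0 : Nat) : Int) := by
    rw [PySem.Str.find_eq]
    have hop : ("{" : String).toList = ['{'] := by decide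
    rw [hop]
    simp [PySem.Chars.findFrom_zero]
  rw [h0, pv_main text (text.toList.length + 1) 0 [] (Nat.zero_le _) (by omega)]
  simp
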